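-- pv_equiv track=rewrite | github.com/Mihretthe/Competitive-Programming | D_Line.py | solve
-- ===== SOURCE A (Python) =====
-- def solve(s, n):
--     R = list(range(n - 1, -1, -1))
--     L = R[::-1]
--     values = []
--     for i in range(n):
--         if s[i] == "L":
--             values.append(i)
--         else:
--             values.append(n - 1 - i)
--
--     ans = []
--     enumerated = list(enumerate(values))
--     enumerated.sort(key = lambda x : x[1])
--     max_sum = sum(values)
--
--     for index, value in enumerated:
--         values[index] = max(L[index], R[index])
--         if values[index] > value:
--             max_sum += (values[index] - value)
--         ans.append(max_sum)
--
--     return  ans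
-- ===== SOURCE B (Python) =====
-- def solve(s, n):
--     # no sorting: an index i can only carry value i ('L') or n-1-i (otherwise),
--     # so for each value v in ascending order the only candidate indices are v and n-1-v;
--     # visit them in ascending index order (stable tie order) and accumulate.
--     total = 0
--     for i in range(n):
--         total += i if s[i] == "L" else n - 1 - i
--     ans = []
--     for v in range(n):
--         lo = min(v, n - 1 - v)
--         hi = max(v, n - 1 - v)
--         for i in ([lo] if lo == hi else [lo, hi]):
--             if (i if s[i] == "L" else n - 1 - i) == v:
--                 total += hi - v
--                 ans.append(total)
--     return ans
-- ===== Notes on version B (the rewrite author's own statement) =====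
-- stated objective: alternative
-- what changed: B drops the comparison sort entirely: since an index i can only carry value i ('L') or n-1-i (otherwise), B sweeps values v = 0..n-1 and probes only the two candidate indices min/max(v, n-1-v) in ascending index order (reproducing the stable tie order), accumulating the running sums directly in two linear passes.
import Mathlib
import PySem

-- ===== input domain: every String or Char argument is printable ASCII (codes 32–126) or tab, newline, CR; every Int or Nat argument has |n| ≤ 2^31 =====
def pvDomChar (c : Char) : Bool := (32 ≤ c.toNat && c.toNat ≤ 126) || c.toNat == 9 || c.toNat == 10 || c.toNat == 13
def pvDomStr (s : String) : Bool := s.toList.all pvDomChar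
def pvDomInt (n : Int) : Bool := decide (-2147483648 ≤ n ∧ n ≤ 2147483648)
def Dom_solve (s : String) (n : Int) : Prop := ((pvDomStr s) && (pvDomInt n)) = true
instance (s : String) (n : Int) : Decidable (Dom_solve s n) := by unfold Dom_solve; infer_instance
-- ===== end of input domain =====

-- B replaces A's stable comparison sort of the (index, value) pairs by a direct sweep over the
-- value range, probing the only two indices that can carry each value (alternative algorithm).

-- ===== PORT A =====
def solve (s : String) (n : Int) : List Int :=
  let R := PySem.List.pyRange (n - 1) (-1) (-1)
  let L := (PySem.List.slice? R none none (-1)).getD []   -- R[::-1]; step -1 always returns some (exact)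
  let values := (PySem.List.pyRange 0 n 1).foldl
      (fun acc i => if (PySem.Str.pyGet? s i).getD ' ' == 'L' then acc ++ [i] else acc ++ [n - 1 - i]) []
      -- s[i]: in range under Pre_solve, so getD is exact there
  let enumerated := PySem.List.enumerate values 0
  let enumSorted := PySem.List.sorted enumerated (fun x => x.2) false
  let maxSum := values.sum
  let st := enumSorted.foldl (fun st p =>
      let newv := max (PySem.List.pyGetD L p.1 0) (PySem.List.pyGetD R p.1 0)
      let vals' := PySem.List.pySetD st.1 p.1 newv      -- values[index] = max(L[index], R[index])
      let got := PySem.List.pyGetD vals' p.1 0          -- values[index] (in range, exact)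
      let ms' := if got > p.2 then st.2.1 + (got - p.2) else st.2.1
      (vals', ms', st.2.2 ++ [ms'])) (values, maxSum, ([] : List Int))
  st.2.2

-- ===== PORT B =====
def solve_alt (s : String) (n : Int) : List Int :=
  let total0 := (PySem.List.pyRange 0 n 1).foldl
      (fun t i => t + (if (PySem.Str.pyGet? s i).getD ' ' == 'L' then i else n - 1 - i)) 0
  let st := (PySem.List.pyRange 0 n 1).foldl (fun st v =>
      let lo := min v (n - 1 - v)
      let hi := max v (n - 1 - v)
      let cand := if lo == hi then [lo] else [lo, hi]
      cand.foldl (fun st i =>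
        if ((if (PySem.Str.pyGet? s i).getD ' ' == 'L' then i else n - 1 - i) == v)
        then (st.1 + (hi - v), st.2 ++ [st.1 + (hi - v)]) else st) st)
      ((total0, ([] : List Int)))
  st.2

-- ===== PRECONDITION & SPEC =====
-- Pre_solve excludes exactly the inputs on which Python A raises IndexError (s[i] for some
-- 0 ≤ i < n with n > len(s)); B's Python raises there too.
def Pre_solve (s : String) (n : Int) : Prop := n ≤ (s.length : Int)
instance (s : String) (n : Int) : Decidable (Pre_solve s n) := by unfold Pre_solve; infer_instance
def pvWitness_solve : String × Int := ("LRL", 3)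
def Spec_solve (s : String) (n : Int) (out : List Int) : Prop := out = solve_alt s n
instance (s : String) (n : Int) (out : List Int) : Decidable (Spec_solve s n out) := by unfold Spec_solve; infer_instance

-- ===== CLAIM (what is proved, stated in full; the proofs are below) =====
def Claim_equal_solve : Prop := ∀ (s : String) (n : Int), Dom_solve s n → Pre_solve s n → Spec_solve s n (solve s n)

-- ===== LEMMAS AND PROOFS =====

-- the value Python computes for index i
def pvVal (s : String) (n i : Int) : Int :=
  if (PySem.Str.pyGet? s i).getD ' ' == 'L' then i else n - 1 - i

-- the common accumulation step: add max(i, n-1-i) - v and record the running total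
def pvStep (n : Int) (st : Int × List Int) (p : Int × Int) : Int × List Int :=
  (st.1 + (max p.1 (n - 1 - p.1) - p.2), st.2 ++ [st.1 + (max p.1 (n - 1 - p.1) - p.2)])

-- B's group of (index, value) pairs for value v, in ascending index order
def pvGrp (s : String) (n v : Int) : List (Int × Int) :=
  (if min v (n - 1 - v) == max v (n - 1 - v) then [min v (n - 1 - v)]
   else [min v (n - 1 - v), max v (n - 1 - v)]).filterMap
    (fun i => if pvVal s n i == v then some (i, v) else none)

-- the strict order realised by Python's stable sort on pairs with distinct indices
def pvLrel (p q : Int × Int) : Prop := p.2 < q.2 ∨ (p.2 = q.2 ∧ p.1 < q.1)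

lemma pv_values_eq (s : String) (n : Int) :
    (PySem.List.pyRange 0 n 1).foldl
      (fun acc i => if (PySem.Str.pyGet? s i).getD ' ' == 'L' then acc ++ [i] else acc ++ [n - 1 - i]) []
    = (PySem.List.pyRange 0 n 1).map (pvVal s n) := by
  have h : (fun (acc : List Int) (i : Int) =>
      if (PySem.Str.pyGet? s i).getD ' ' == 'L' then acc ++ [i] else acc ++ [n - 1 - i])
      = fun acc i => acc ++ [pvVal s n i] := by
    funext acc i
    unfold pvVal
    split <;> rfl
  rw [h, PySem.List.foldl_append_singleton_eq_map]
  simp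

lemma pv_sum_foldl (f : Int → Int) (xs : List Int) (t : Int) :
    xs.foldl (fun t i => t + f i) t = t + (xs.map f).sum := by
  induction xs generalizing t with
  | nil => simp
  | cons x xs ih => simp [ih]; ring

lemma pv_insert_pw (x : Int × Int) (acc : List (Int × Int))
    (hpw : acc.Pairwise pvLrel) (hlt : ∀ a ∈ acc, a.1 < x.1) :
    (PySem.List.insertBy (fun a b => decide ((a.2 : Int) < b.2)) x acc).Pairwise pvLrel := by
  induction acc with
  | nil => simp [PySem.List.insertBy]
  | cons y ys ih =>
    rw [List.pairwise_cons] at hpw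
    simp only [PySem.List.insertBy]
    split
    · rename_i hxy
      simp only [decide_eq_true_eq] at hxy
      constructor
      · intro z hz
        rcases List.mem_cons.mp hz with rfl | hz
        · exact Or.inl hxy
        · have := hpw.1 z hz
          unfold pvLrel at this ⊢
          omega
      · exact List.pairwise_cons.mpr hpw
    · rename_i hxy
      simp only [decide_eq_true_eq] at hxy
      constructor
      · intro z hz
        rcases (PySem.List.mem_insertBy _ _ _ _).mp hz with rfl | hz
        · have hyx := hlt y (by simp)
          unfold pvLrel
          omega
        · exact hpw.1 z hz
      · exact ih hpw.2 (fun a ha => hlt a (by simp [ha]))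

lemma pv_stable_pw (xs : List (Int × Int)) :
    ∀ (acc : List (Int × Int)), xs.Pairwise (fun p q => p.1 < q.1) → acc.Pairwise pvLrel →
    (∀ a ∈ acc, ∀ x ∈ xs, a.1 < x.1) →
    (xs.foldl (fun acc x => PySem.List.insertBy (fun a b => decide ((a.2 : Int) < b.2)) x acc) acc).Pairwise pvLrel := by
  induction xs with
  | nil => intro acc _ h _; simpa using h
  | cons x xs ih =>
    intro acc hxs hacc hcross
    rw [List.pairwise_cons] at hxs
    simp only [List.foldl_cons]
    apply ih _ hxs.2
    · exact pv_insert_pw x acc hacc (fun a ha => hcross a ha x (by simp))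
    · intro a ha y hy
      rcases (PySem.List.mem_insertBy _ _ _ _).mp ha with rfl | ha
      · exact hxs.1 y hy
      · exact hcross a ha y (by simp [hy])

lemma pv_sorted_pw (xs : List Int) :
    (PySem.List.sorted (PySem.List.enumerate xs 0) (fun x => x.2) false).Pairwise pvLrel := by
  rw [PySem.List.sorted_eq_foldl_insertBy]
  exact pv_stable_pw _ [] (PySem.List.pairwise_lt_enumerate xs 0) (by simp) (by simp)

lemma pv_mem_grp (s : String) (n v : Int) (p : Int × Int) :
    p ∈ pvGrp s n v ↔ (p.2 = v ∧ (p.1 = min v (n - 1 - v) ∨ p.1 = max v (n - 1 - v)) ∧ pvVal s n p.1 = v) := by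
  unfold pvGrp
  constructor
  · intro h
    simp only [List.mem_filterMap] at h
    obtain ⟨a, ha, hsome⟩ := h
    by_cases hv : pvVal s n a = v
    · simp only [hv, beq_self_eq_true, if_true, Option.some.injEq] at hsome
      subst hsome
      refine ⟨rfl, ?_, hv⟩
      revert ha
      split <;> simp <;> tauto
    · simp [hv] at hsome
  · rintro ⟨h2, hcand, hval⟩
    simp only [List.mem_filterMap]
    refine ⟨p.1, ?_, ?_⟩
    · split
      · rename_i h
        simp only [beq_iff_eq] at h
        simp only [List.mem_singleton]
        omega
      · simp only [List.mem_cons, List.not_mem_nil, or_false]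
        tauto
    · simp only [hval, beq_self_eq_true, if_true, Option.some.injEq]
      rw [← h2]

lemma pv_mem_OP (s : String) (n : Int) (p : Int × Int) :
    p ∈ (PySem.List.pyRange 0 n 1).flatMap (pvGrp s n) ↔
      (0 ≤ p.1 ∧ p.1 < n ∧ p.2 = pvVal s n p.1) := by
  simp only [List.mem_flatMap, PySem.List.mem_pyRange_one, pv_mem_grp]
  constructor
  · rintro ⟨v, ⟨hv0, hvn⟩, h2, hcand, hval⟩
    refine ⟨by omega, by omega, by rw [h2, hval]⟩
  · rintro ⟨h0, h1, h2⟩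
    refine ⟨pvVal s n p.1, ?_, h2, ?_, rfl⟩
    · unfold pvVal
      split <;> omega
    · unfold pvVal
      split <;> omega

lemma pv_OP_pw (s : String) (n : Int) :
    ((PySem.List.pyRange 0 n 1).flatMap (pvGrp s n)).Pairwise pvLrel := by
  rw [List.pairwise_flatMap]
  constructor
  · intro v _
    unfold pvGrp
    split
    · by_cases h1 : pvVal s n (min v (n - 1 - v)) = v <;> simp [List.filterMap, h1]
    · rename_i hne
      simp only [beq_iff_eq] at hne
      by_cases h1 : pvVal s n (min v (n - 1 - v)) = v <;>
        by_cases h2 : pvVal s n (max v (n - 1 - v)) = v <;>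
          simp [List.filterMap, h1, h2, pvLrel] <;> omega
  · have hpw := PySem.List.pairwise_lt_pyRange_one (a := 0) (b := n)
    refine hpw.imp ?_
    intro v w hvw x hx y hy
    have hxv := ((pv_mem_grp s n v x).mp hx).1
    have hyw := ((pv_mem_grp s n w y).mp hy).1
    exact Or.inl (by omega)

lemma pv_mem_E (s : String) (n : Int) (p : Int × Int) :
    p ∈ PySem.List.enumerate ((PySem.List.pyRange 0 n 1).map (pvVal s n)) 0 ↔
      (0 ≤ p.1 ∧ p.1 < n ∧ p.2 = pvVal s n p.1) := by
  rw [PySem.List.mem_enumerate_iff]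
  constructor
  · rintro ⟨k, hk, rfl⟩
    have hk' : k < (n - 0).toNat := by
      simpa [PySem.List.length_pyRange_one] using hk
    have hget : ((PySem.List.pyRange 0 n 1).map (pvVal s n))[k] = pvVal s n (0 + (k : Int)) := by
      rw [List.getElem_map, PySem.List.getElem_pyRange_one]
    refine ⟨by simp, by simp; omega, by simp [hget]⟩
  · rintro ⟨h0, h1, h2⟩
    have hlen : ((PySem.List.pyRange 0 n 1).map (pvVal s n)).length = (n - 0).toNat := by
      simp [PySem.List.length_pyRange_one]
    refine ⟨p.1.toNat, by omega, ?_⟩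
    have hget : ((PySem.List.pyRange 0 n 1).map (pvVal s n))[p.1.toNat]'(by omega)
        = pvVal s n (0 + (p.1.toNat : Int)) := by
      rw [List.getElem_map, PySem.List.getElem_pyRange_one]
    rw [hget]
    have hcast : (0 : Int) + (p.1.toNat : Int) = p.1 := by omega
    rw [hcast, ← h2]

lemma pv_sorted_eq_OP (s : String) (n : Int) :
    PySem.List.sorted (PySem.List.enumerate ((PySem.List.pyRange 0 n 1).map (pvVal s n)) 0) (fun x => x.2) false
      = (PySem.List.pyRange 0 n 1).flatMap (pvGrp s n) := by
  have hnE : (PySem.List.enumerate ((PySem.List.pyRange 0 n 1).map (pvVal s n)) 0).Nodup :=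
    (PySem.List.pairwise_lt_enumerate _ 0).imp (fun h heq => by rw [heq] at h; exact lt_irrefl _ h)
  have hnOP : ((PySem.List.pyRange 0 n 1).flatMap (pvGrp s n)).Nodup :=
    (pv_OP_pw s n).imp (fun h heq => by
      unfold pvLrel at h; rw [heq] at h; omega)
  have hperm : (PySem.List.sorted (PySem.List.enumerate ((PySem.List.pyRange 0 n 1).map (pvVal s n)) 0) (fun x => x.2) false).Perm
      ((PySem.List.pyRange 0 n 1).flatMap (pvGrp s n)) := by
    refine (PySem.List.sorted_perm _ _ _).trans ?_
    rw [List.perm_ext_iff_of_nodup hnE hnOP]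
    intro p
    rw [pv_mem_E, pv_mem_OP]
  refine List.eq_of_perm_of_sorted ?_ (pv_sorted_pw _) (pv_OP_pw s n) hperm
  intro a b _ _ h1 h2
  unfold pvLrel at h1 h2
  have : a.1 = b.1 ∧ a.2 = b.2 := by omega
  exact Prod.ext this.1 this.2

lemma pv_foldA (s : String) (n : Int) (ps : List (Int × Int)) :
    ∀ (vals : List Int) (t : Int) (ans : List Int),
    (∀ p ∈ ps, 0 ≤ p.1 ∧ p.1 < n ∧ p.2 = pvVal s n p.1) → vals.length = n.toNat →
    (ps.foldl (fun st p =>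
      (PySem.List.pySetD st.1 p.1 (max (PySem.List.pyGetD (PySem.List.pyRange 0 n 1) p.1 0) (PySem.List.pyGetD (PySem.List.pyRange (n-1) (-1) (-1)) p.1 0)),
       if PySem.List.pyGetD (PySem.List.pySetD st.1 p.1 (max (PySem.List.pyGetD (PySem.List.pyRange 0 n 1) p.1 0) (PySem.List.pyGetD (PySem.List.pyRange (n-1) (-1) (-1)) p.1 0))) p.1 0 > p.2 then st.2.1 + (PySem.List.pyGetD (PySem.List.pySetD st.1 p.1 (max (PySem.List.pyGetD (PySem.List.pyRange 0 n 1) p.1 0) (PySem.List.pyGetD (PySem.List.pyRange (n-1) (-1) (-1)) p.1 0))) p.1 0 - p.2) else st.2.1,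
       st.2.2 ++ [if PySem.List.pyGetD (PySem.List.pySetD st.1 p.1 (max (PySem.List.pyGetD (PySem.List.pyRange 0 n 1) p.1 0) (PySem.List.pyGetD (PySem.List.pyRange (n-1) (-1) (-1)) p.1 0))) p.1 0 > p.2 then st.2.1 + (PySem.List.pyGetD (PySem.List.pySetD st.1 p.1 (max (PySem.List.pyGetD (PySem.List.pyRange 0 n 1) p.1 0) (PySem.List.pyGetD (PySem.List.pyRange (n-1) (-1) (-1)) p.1 0))) p.1 0 - p.2) else st.2.1])) (vals, t, ans)).2
    = ps.foldl (pvStep n) (t, ans) := by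
  induction ps with
  | nil => intro vals t ans _ _; rfl
  | cons p ps ih =>
    intro vals t ans hinv hlen
    obtain ⟨h0, h1, h2⟩ := hinv p (by simp)
    have hL : PySem.List.pyGetD (PySem.List.pyRange 0 n 1) p.1 0 = p.1 := by
      have hid : PySem.List.pyRange 0 n 1 = (PySem.List.pyRange 0 n 1).map (fun j => j) := by simp
      rw [hid, PySem.List.pyGetD_map_pyRange_of_nonneg _ n p.1 0 h0 h1]
    have hR : PySem.List.pyGetD (PySem.List.pyRange (n-1) (-1) (-1)) p.1 0 = n - 1 - p.1 := by
      rw [PySem.List.pyRange_neg_one]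
      rw [PySem.List.pyGetD_eq_getElem _ 0 h0 (by simp; omega)]
      rw [List.getElem_map, List.getElem_range]
      omega
    have hcast : p.1 = ((p.1.toNat : Nat) : Int) := by omega
    have hgot : PySem.List.pyGetD (PySem.List.pySetD vals p.1 (max p.1 (n - 1 - p.1))) p.1 0
        = max p.1 (n - 1 - p.1) := by
      rw [hcast, PySem.List.pyGetD_pySetD_natCast vals p.1.toNat p.1.toNat _ 0 (by omega)]
      simp
    have hle : p.2 ≤ max p.1 (n - 1 - p.1) := by
      rw [h2]; unfold pvVal; split <;> omega
    simp only [List.foldl_cons, hL, hR, hgot]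
    have hms : (if max p.1 (n - 1 - p.1) > p.2 then t + (max p.1 (n - 1 - p.1) - p.2) else t)
        = t + (max p.1 (n - 1 - p.1) - p.2) := by split <;> omega
    rw [hms]
    rw [ih _ _ _ (fun q hq => hinv q (by simp [hq])) (by rw [PySem.List.length_pySetD]; exact hlen)]
    simp [pvStep]

lemma pv_groupB (s : String) (n v : Int) (st : Int × List Int) :
    (if min v (n - 1 - v) == max v (n - 1 - v) then [min v (n - 1 - v)]
     else [min v (n - 1 - v), max v (n - 1 - v)]).foldl
      (fun st i =>
        if ((if (PySem.Str.pyGet? s i).getD ' ' == 'L' then i else n - 1 - i) == v)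
        then (st.1 + (max v (n - 1 - v) - v), st.2 ++ [st.1 + (max v (n - 1 - v) - v)]) else st) st
    = (pvGrp s n v).foldl (pvStep n) st := by
  have hlo : max (min v (n - 1 - v)) (n - 1 - min v (n - 1 - v)) = max v (n - 1 - v) := by omega
  have hhi : max (max v (n - 1 - v)) (n - 1 - max v (n - 1 - v)) = max v (n - 1 - v) := by omega
  unfold pvGrp
  simp only [pvVal, beq_iff_eq, PySem.Str.pyGet?]
  split
  · simp only [List.foldl_cons, List.foldl_nil, List.filterMap_cons, List.filterMap_nil]
    by_cases hc1 : (if (PySem.Chars.pyGet? s.toList (min v (n - 1 - v))).getD ' ' = 'L'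
        then (min v (n - 1 - v)) else n - 1 - (min v (n - 1 - v))) = v
    · rw [hc1]; simp [pvStep, hlo]
    · rw [if_neg hc1, if_neg hc1]; simp
  · simp only [List.foldl_cons, List.foldl_nil, List.filterMap_cons, List.filterMap_nil]
    by_cases hc1 : (if (PySem.Chars.pyGet? s.toList (min v (n - 1 - v))).getD ' ' = 'L'
        then (min v (n - 1 - v)) else n - 1 - (min v (n - 1 - v))) = v <;>
    by_cases hc2 : (if (PySem.Chars.pyGet? s.toList (max v (n - 1 - v))).getD ' ' = 'L'
        then (max v (n - 1 - v)) else n - 1 - (max v (n - 1 - v))) = v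
    · rw [hc1, hc2]; simp [pvStep, hlo, hhi]
    · rw [hc1, if_neg hc2, if_neg hc2]; simp [pvStep, hlo]
    · rw [if_neg hc1, if_neg hc1, hc2]; simp [pvStep, hhi]
    · rw [if_neg hc1, if_neg hc1, if_neg hc2, if_neg hc2]; simp

-- ===== VERDICT (by name: the statement is the Claim_ definition above) =====
theorem solve_spec : Claim_equal_solve := by
  intro s n _ _
  unfold Spec_solve
  have hLeq : (PySem.List.slice? (PySem.List.pyRange (n-1) (-1) (-1)) none none (-1)).getD ([] : List Int)
      = PySem.List.pyRange 0 n 1 := by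
    have e1 : (-1 : Int) + 1 = 0 := by norm_num
    have e2 : n - 1 + 1 = n := by ring
    rw [PySem.List.slice?_none_none_neg_one, PySem.List.pyRange_neg_one_eq_reverse, e1, e2]
    simp
  have hinv : ∀ p ∈ (PySem.List.pyRange 0 n 1).flatMap (pvGrp s n),
      0 ≤ p.1 ∧ p.1 < n ∧ p.2 = pvVal s n p.1 := fun p hp => (pv_mem_OP s n p).mp hp
  have hlen : ((PySem.List.pyRange 0 n 1).map (pvVal s n)).length = n.toNat := by
    simp [PySem.List.length_pyRange_one]
  have htot : (PySem.List.pyRange 0 n 1).foldl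
      (fun t i => t + (if (PySem.Str.pyGet? s i).getD ' ' == 'L' then i else n - 1 - i)) 0
      = 0 + ((PySem.List.pyRange 0 n 1).map (pvVal s n)).sum := pv_sum_foldl (pvVal s n) _ 0
  simp only [solve, solve_alt]
  rw [hLeq]
  rw [pv_values_eq s n]
  rw [pv_sorted_eq_OP s n]
  rw [pv_foldA s n _ _ _ _ hinv hlen]
  rw [htot, zero_add]
  rw [List.foldl_flatMap]
  exact congrArg Prod.snd (PySem.List.foldl_congr_mem _ _ _ _ (fun acc v hv => (pv_groupB s n v acc).symm))
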